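-- pv_equiv track=rewrite | github.com/hsycamp/algorithm | programmers/Level_3/ night_work_index.py | solution
-- ===== SOURCE A (Python) =====
-- import heapq
--
-- def solution(n, works):
--     for i in range(len(works)):
--         works[i] *= -1
--     heapq.heapify(works)
--
--     for i in range(n):
--         m = heapq.heappop(works)
--         if m == 0:
--             return 0
--         heapq.heappush(works, m+1)
--     answer = sum([x**2 for x in works])
--     return answer
-- ===== SOURCE B (Python) =====
-- def solution(n, works):
--     if n <= 0 or not works:
--         return sum(w * w for w in works)
--     reducible = sum(w for w in works if w > 0)
--     if max(works) >= 0 and n > reducible: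
--         return 0
--
--     def excess(level):
--         return sum(w - level for w in works if w > level)
--
--     # binary search the smallest level L with excess(L) <= n
--     hi = max(works)        # excess(hi) = 0 <= n
--     lo = hi - n - 1        # excess(lo) >= n + 1 > n
--     while lo + 1 < hi:
--         mid = (lo + hi) // 2
--         if excess(mid) <= n:
--             hi = mid
--         else:
--             lo = mid
--     level = hi
--     r = n - excess(level)                       # r elements go one step below the level
--     c = sum(1 for w in works if w >= level)
--     below = sum(w * w for w in works if w < level)
--     return below + r * (level - 1) ** 2 + (c - r) * level * level
-- ===== Notes on version B (the rewrite author's own statement) =====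
-- stated objective: faster
-- what changed: A simulates n rounds of pop-max/decrement on a heap (O(n log k)); B binary-searches the final uniform 'water level' of that greedy and computes the answer from the level in O(k) passes, eliminating the per-hour loop entirely.
import Mathlib
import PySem

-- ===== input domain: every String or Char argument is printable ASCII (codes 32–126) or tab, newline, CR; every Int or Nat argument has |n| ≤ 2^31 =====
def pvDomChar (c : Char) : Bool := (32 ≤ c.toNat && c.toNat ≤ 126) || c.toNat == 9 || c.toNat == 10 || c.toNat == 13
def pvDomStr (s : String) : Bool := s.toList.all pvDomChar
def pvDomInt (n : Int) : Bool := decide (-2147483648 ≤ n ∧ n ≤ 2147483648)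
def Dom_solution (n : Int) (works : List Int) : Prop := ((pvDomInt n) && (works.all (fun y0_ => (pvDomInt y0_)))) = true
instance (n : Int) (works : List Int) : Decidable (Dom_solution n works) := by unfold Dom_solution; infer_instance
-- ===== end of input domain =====

-- B replaces A's n-round heap simulation (O(n log k)) by a binary search for the final
-- "water level" of the greedy, then computes the answer from that level in one pass.
-- NOTE: Python A mutates `works` in place (negates and heapifies it); the equivalence
-- proved here is about the RETURN value only.

-- ===== PORT A =====
-- heapq.heapify/heappop/heappush are ported by their library contract: the heap is the
-- list of its elements, heappop removes (a) minimum element, heappush appends; the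
-- returned value only depends on the multiset, which this models exactly.
def solLoop : Nat → List Int → Option (List Int)
  | 0, h => some h
  | k+1, h =>
    match PySem.List.min? h (fun x => x) with
    | none => some h             -- heappop of an empty heap raises IndexError: outside Pre_
    | some m =>
      if m = 0 then none         -- "return 0"
      else solLoop k (((PySem.List.remove? h m).getD []) ++ [m + 1])

def solution (n : Int) (works : List Int) : Int :=
  let h := works.map (fun x => x * (-1))
  match solLoop n.toNat h with
  | none => 0
  | some h' => (h'.map (fun x => x ^ 2)).sum

-- ===== PORT B =====
def excessB (works : List Int) (level : Int) : Int :=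
  works.foldl (fun s w => if level < w then s + (w - level) else s) 0

def bsLoop (works : List Int) (n : Int) : Nat → Int → Int → Int
  | 0, _, hi => hi
  | f+1, lo, hi =>
    if lo + 1 < hi then
      let mid := PySem.Int.floordiv (lo + hi) 2
      if excessB works mid ≤ n then bsLoop works n f lo mid
      else bsLoop works n f mid hi
    else hi

def solution_alt (n : Int) (works : List Int) : Int :=
  if n ≤ 0 ∨ works = [] then (works.map (fun w => w * w)).sum
  else
    let reducible := works.foldl (fun s w => if 0 < w then s + w else s) 0
    let mx := (PySem.List.max? works (fun x => x)).getD 0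
    if 0 ≤ mx ∧ reducible < n then 0
    else
      let hi := mx
      let lo := hi - n - 1
      let level := bsLoop works n (hi - lo).toNat lo hi
      let r := n - excessB works level
      let c := works.foldl (fun s w => if level ≤ w then s + 1 else s) 0
      let below := works.foldl (fun s w => if w < level then s + w * w else s) 0
      below + r * ((level - 1) * (level - 1)) + (c - r) * (level * level)

-- ===== PRECONDITION & SPEC =====
-- Pre_ excludes only the inputs where A raises IndexError (heappop of an empty heap).
def Pre_solution (n : Int) (works : List Int) : Prop := 0 < n → works ≠ []
instance (n : Int) (works : List Int) : Decidable (Pre_solution n works) := by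
  unfold Pre_solution; infer_instance

def pvWitness_solution : Int × List Int := (2, [3, 1])

def Spec_solution (n : Int) (works : List Int) (out : Int) : Prop := out = solution_alt n works
instance (n : Int) (works : List Int) (out : Int) : Decidable (Spec_solution n works out) := by
  unfold Spec_solution; infer_instance

-- ===== CLAIM (what is proved, stated in full; the proofs are below) =====
def Claim_equal_solution : Prop := ∀ (n : Int) (works : List Int), Dom_solution n works →
  Pre_solution n works → Spec_solution n works (solution n works)

-- ===== LEMMAS AND PROOFS =====

/-- Sum of `f` over a list; every quantity both programs maintain is of this shape. -/
def mapSum (f : Int → Int) (h : List Int) : Int := (h.map f).sum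

def excF (L : Int) : Int → Int := fun m => max (-m - L) 0
def redF : Int → Int := fun m => max (-m) 0
def belF (L : Int) : Int → Int := fun m => if -m < L then m * m else 0
def cntF (L : Int) : Int → Int := fun m => if L ≤ -m then 1 else 0
def sqF : Int → Int := fun m => m * m

def FinalSum (k : Nat) (h : List Int) : Int :=
  match solLoop k h with
  | none => 0
  | some h' => mapSum sqF h'

def formValH (h : List Int) (n L : Int) : Int :=
  mapSum (belF L) h + (n - mapSum (excF L) h) * ((L - 1) * (L - 1)) +
    (mapSum (cntF L) h - (n - mapSum (excF L) h)) * (L * L)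

lemma mapSum_nil (f : Int → Int) : mapSum f [] = 0 := rfl
lemma mapSum_cons (f : Int → Int) (x : Int) (h : List Int) :
    mapSum f (x :: h) = f x + mapSum f h := by simp [mapSum]

lemma mapSum_perm (f : Int → Int) {h1 h2 : List Int} (p : h1.Perm h2) :
    mapSum f h1 = mapSum f h2 := (p.map f).sum_eq

lemma mapSum_step (f : Int → Int) {m : Int} {h : List Int} (hm : m ∈ h) (v : Int) :
    mapSum f (h.erase m ++ [v]) = mapSum f h - f m + f v := by
  have h1 : mapSum f h = f m + mapSum f (h.erase m) :=
    (mapSum_perm f (List.perm_cons_erase hm)).trans (mapSum_cons f m _)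
  have h2 : mapSum f (h.erase m ++ [v]) = mapSum f (h.erase m) + f v := by
    simp [mapSum]
  omega

lemma mapSum_nonneg (f : Int → Int) {h : List Int} (hf : ∀ x ∈ h, 0 ≤ f x) :
    0 ≤ mapSum f h := by
  induction h with
  | nil => simp [mapSum_nil]
  | cons x t ih =>
    have := hf x (by simp)
    have := ih (fun y hy => hf y (by simp [hy]))
    rw [mapSum_cons]; omega

lemma mapSum_eq_zero_of (f : Int → Int) {h : List Int} (hf : ∀ x ∈ h, f x = 0) :
    mapSum f h = 0 := by
  induction h with
  | nil => rfl
  | cons x t ih =>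
    rw [mapSum_cons, hf x (by simp), ih (fun y hy => hf y (by simp [hy]))]; ring

lemma single_le_mapSum (f : Int → Int) {h : List Int} (hf : ∀ y ∈ h, 0 ≤ f y)
    {x : Int} (hx : x ∈ h) : f x ≤ mapSum f h := by
  induction h with
  | nil => cases hx
  | cons a t ih =>
    rw [mapSum_cons]
    rcases List.mem_cons.mp hx with rfl | hx'
    · have := mapSum_nonneg (h := t) f (fun y hy => hf y (List.mem_cons_of_mem _ hy)); omega
    · have := hf a (by simp)
      have := ih (fun y hy => hf y (List.mem_cons_of_mem a hy)) hx'
      omega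

lemma mapSum_exc_eq_zero {h : List Int} {L : Int} (hle : ∀ m ∈ h, -m ≤ L) :
    mapSum (excF L) h = 0 :=
  mapSum_eq_zero_of _ (fun x hx => by have := hle x hx; simp [excF]; omega)

lemma exc_zero_all_le {h : List Int} {L : Int} (h0 : mapSum (excF L) h = 0) :
    ∀ m ∈ h, -m ≤ L := by
  intro m hm
  have h1 : 0 ≤ excF L m := by simp [excF]
  have h2 := single_le_mapSum (excF L) (fun y _ => by simp [excF]) hm
  have : excF L m = 0 := by omega
  simp only [excF] at this
  omega

lemma base_split {h : List Int} {L : Int} (hle : ∀ m ∈ h, -m ≤ L) :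
    mapSum (belF L) h + mapSum (cntF L) h * (L * L) = mapSum sqF h := by
  induction h with
  | nil => simp [mapSum_nil]
  | cons x t ih =>
    have hx := hle x (by simp)
    have iht := ih (fun m hm => hle m (List.mem_cons_of_mem _ hm))
    simp only [mapSum_cons]
    by_cases hlt : -x < L
    · simp only [belF, cntF, sqF, if_pos hlt, if_neg (by omega : ¬ L ≤ -x)] at *
      ring_nf
      ring_nf at iht
      omega
    · have hx' : -x = L := by omega
      simp only [belF, cntF, sqF, if_neg hlt, if_pos (by omega : L ≤ -x)] at *
      have hxx : x * x = L * L := by rw [← hx']; ring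
      rw [add_mul, one_mul]
      omega

lemma FinalSum_step {k : Nat} {h : List Int} {m : Int}
    (hmin : PySem.List.min? h (fun x => x) = some m) (hm0 : m ≠ 0) :
    FinalSum (k + 1) h = FinalSum k (h.erase m ++ [m + 1]) := by
  have hmem : m ∈ h := PySem.List.min?_mem hmin
  simp only [FinalSum, solLoop, hmin, if_neg hm0,
    PySem.List.remove?_eq_some_erase h m hmem, Option.getD_some]

lemma min?_exists_of_ne_nil {h : List Int} (hne : h ≠ []) :
    ∃ m, PySem.List.min? h (fun x => x) = some m := by
  cases hmin : PySem.List.min? h (fun x => x) with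
  | none => exact absurd ((PySem.List.min?_eq_none_iff h _).mp hmin) hne
  | some m => exact ⟨m, rfl⟩

lemma zeroLemma : ∀ (k : Nat) (h : List Int) (m : Int),
    PySem.List.min? h (fun x => x) = some m → m ≤ 0 → mapSum redF h < (k : Int) →
    FinalSum k h = 0 := by
  intro k
  induction k with
  | zero =>
    intro h m _ _ hred
    have := mapSum_nonneg redF (h := h) (fun x _ => by simp [redF])
    omega
  | succ k ih =>
    intro h m hmin hm hred
    by_cases hm0 : m = 0
    · simp [FinalSum, solLoop, hmin, hm0]
    · have hmem : m ∈ h := PySem.List.min?_mem hmin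
      have hmlt : m < 0 := by omega
      rw [FinalSum_step hmin hm0]
      have hred' : mapSum redF (h.erase m ++ [m + 1]) = mapSum redF h - 1 := by
        rw [mapSum_step redF hmem (m + 1)]
        simp only [redF]
        omega
      have hne' : h.erase m ++ [m + 1] ≠ [] := by simp
      obtain ⟨m'', hmin''⟩ := min?_exists_of_ne_nil hne'
      have hmem'' : m + 1 ∈ h.erase m ++ [m + 1] := by simp
      have hle'' : m'' ≤ m + 1 := PySem.List.min?_isMin hmin'' (m + 1) hmem''
      exact ih _ m'' hmin'' (by omega) (by push_cast at hred ⊢; omega)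

lemma mainLemma : ∀ (k : Nat) (h : List Int) (m L : Int),
    PySem.List.min? h (fun x => x) = some m →
    ¬ (m ≤ 0 ∧ mapSum redF h < (k : Int)) →
    mapSum (excF L) h ≤ (k : Int) → (k : Int) < mapSum (excF (L - 1)) h →
    FinalSum k h = formValH h (k : Int) L := by
  intro k
  induction k with
  | zero =>
    intro h m L _ _ hexc hexc1
    have hge := mapSum_nonneg (excF L) (h := h) (fun x _ => by simp [excF])
    have hexc0 : mapSum (excF L) h = 0 := by push_cast at hexc; omega
    have hle := exc_zero_all_le hexc0
    have hbs := base_split hle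
    have hF : FinalSum 0 h = mapSum sqF h := by simp [FinalSum, solLoop]
    rw [hF]
    simp only [formValH, hexc0]
    push_cast
    linarith [hbs]
  | succ k ih =>
    intro h m L hmin hcond hexc hexc1
    have hmem : m ∈ h := PySem.List.min?_mem hmin
    have hall : ∀ x ∈ h, m ≤ x := fun x hx => PySem.List.min?_isMin hmin x hx
    have hm0 : m ≠ 0 := by
      intro hmz
      subst hmz
      have hr0 : mapSum redF h = 0 := mapSum_eq_zero_of _ (fun x hx => by
        have := hall x hx; simp [redF]; omega)
      exact hcond ⟨le_refl 0, by push_cast; omega⟩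
    have hL : L ≤ -m := by
      by_contra hc
      have h0 : mapSum (excF (L - 1)) h = 0 := mapSum_exc_eq_zero (fun x hx => by
        have := hall x hx; omega)
      push_cast at hexc1
      omega
    rw [FinalSum_step hmin hm0]
    have hne' : h.erase m ++ [m + 1] ≠ [] := by simp
    obtain ⟨m'', hmin''⟩ := min?_exists_of_ne_nil hne'
    have hall' : ∀ x ∈ h.erase m ++ [m + 1], m ≤ x := by
      intro x hx
      rcases List.mem_append.mp hx with hx' | hx'
      · exact hall x (List.mem_of_mem_erase hx')
      · simp at hx'; omega
    have hm''ge : m ≤ m'' := hall' m'' (PySem.List.min?_mem hmin'')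
    have hcond' : ¬ (m'' ≤ 0 ∧ mapSum redF (h.erase m ++ [m + 1]) < (k : Int)) := by
      rintro ⟨h1, h2⟩
      have hred' : mapSum redF (h.erase m ++ [m + 1]) = mapSum redF h - 1 := by
        rw [mapSum_step redF hmem (m + 1)]; simp only [redF]; omega
      exact hcond ⟨by omega, by push_cast at h2 ⊢; omega⟩
    have hexcL' := mapSum_step (excF L) hmem (m + 1)
    have hexcL1' := mapSum_step (excF (L - 1)) hmem (m + 1)
    have hbel' := mapSum_step (belF L) hmem (m + 1)
    have hcnt' := mapSum_step (cntF L) hmem (m + 1)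
    have e3 : excF (L - 1) m = -m - L + 1 := by simp only [excF]; omega
    have e4 : excF (L - 1) (m + 1) = -m - L := by simp only [excF]; omega
    by_cases hLM : L = -m
    · -- the level equals the current maximum value
      have hexc0 : mapSum (excF L) h = 0 := mapSum_exc_eq_zero (fun x hx => by
        have := hall x hx; omega)
      have e1 : excF L m = 0 := by simp only [excF]; omega
      have e2 : excF L (m + 1) = 0 := by simp only [excF]; omega
      have b1 : belF L m = 0 := by
        simp only [belF]; rw [if_neg (by omega)]
      have b2 : belF L (m + 1) = (m + 1) * (m + 1) := by
        simp only [belF]; rw [if_pos (by omega)]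
      have c1 : cntF L m = 1 := by
        simp only [cntF]; rw [if_pos (by omega)]
      have c2 : cntF L (m + 1) = 0 := by
        simp only [cntF]; rw [if_neg (by omega)]
      rw [ih _ m'' L hmin'' hcond' (by rw [hexcL', e1, e2, hexc0]; push_cast; omega)
            (by rw [hexcL1', e3, e4]; push_cast at hexc1 ⊢; omega)]
      simp only [formValH, hexcL', hbel', hcnt', e1, e2, b1, b2, c1, c2, hexc0]
      subst hLM
      push_cast
      ring
    · -- the level is strictly below the current maximum value
      have hLlt : L < -m := by omega
      have e1 : excF L m = -m - L := by simp only [excF]; omega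
      have e2 : excF L (m + 1) = -m - 1 - L := by simp only [excF]; omega
      have b1 : belF L m = 0 := by
        simp only [belF]; rw [if_neg (by omega)]
      have b2 : belF L (m + 1) = 0 := by
        simp only [belF]; rw [if_neg (by omega)]
      have c1 : cntF L m = 1 := by
        simp only [cntF]; rw [if_pos (by omega)]
      have c2 : cntF L (m + 1) = 1 := by
        simp only [cntF]; rw [if_pos (by omega)]
      rw [ih _ m'' L hmin'' hcond' (by rw [hexcL', e1, e2]; push_cast at hexc ⊢; omega)
            (by rw [hexcL1', e3, e4]; push_cast at hexc1 ⊢; omega)]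
      simp only [formValH, hexcL', hbel', hcnt', e1, e2, b1, b2, c1, c2]
      push_cast
      ring

lemma bsLoop_spec (works : List Int) (n : Int) : ∀ (fuel : Nat) (lo hi : Int),
    lo < hi → hi - lo ≤ (fuel : Int) → n < excessB works lo → excessB works hi ≤ n →
    excessB works (bsLoop works n fuel lo hi) ≤ n ∧
      n < excessB works (bsLoop works n fuel lo hi - 1) := by
  intro fuel
  induction fuel with
  | zero =>
    intro lo hi h1 h2 _ _
    push_cast at h2
    omega
  | succ f ih =>
    intro lo hi h1 h2 h3 h4
    by_cases hlh : lo + 1 < hi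
    · have hmid1 : lo + 1 ≤ PySem.Int.floordiv (lo + hi) 2 :=
        (PySem.Int.le_floordiv_iff_mul_le (by norm_num)).mpr (by omega)
      have hmid2 : PySem.Int.floordiv (lo + hi) 2 < hi :=
        (PySem.Int.floordiv_lt_iff_lt_mul (by norm_num)).mpr (by omega)
      rw [bsLoop, if_pos hlh]
      by_cases hex : excessB works (PySem.Int.floordiv (lo + hi) 2) ≤ n
      · rw [if_pos hex]
        exact ih lo _ (by omega) (by push_cast at h2 ⊢; omega) h3 hex
      · rw [if_neg hex]
        exact ih _ hi (by omega) (by push_cast at h2 ⊢; omega) (by omega) h4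
    · rw [bsLoop, if_neg hlh]
      have : hi - 1 = lo := by omega
      rw [this]
      exact ⟨h4, h3⟩

/-- A Python loop `for w in works: if p(w): s += g(w)` equals the sum of `f` over the
negated list, when `f (w * -1)` is that contribution. -/
lemma foldl_to_mapSum (ws : List Int) (p : Int → Prop) [DecidablePred p] (g f : Int → Int)
    (hf : ∀ w, (if p w then g w else 0) = f (w * (-1))) :
    ws.foldl (fun s w => if p w then s + g w else s) 0 =
      mapSum f (ws.map (fun x => x * (-1))) := by
  have h1 : ws.foldl (fun s w => if p w then s + g w else s) 0 =
      ws.foldl (fun s w => s + (if p w then g w else 0)) 0 := by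
    refine PySem.List.foldl_congr_mem ws _ _ 0 (fun acc x _ => ?_)
    split_ifs <;> omega
  rw [h1, PySem.List.foldl_add, zero_add]
  simp only [mapSum, List.map_map]
  exact congrArg List.sum (List.map_congr_left (fun w _ => hf w))

lemma conv_excessB (ws : List Int) (X : Int) :
    excessB ws X = mapSum (excF X) (ws.map (fun x => x * (-1))) := by
  refine foldl_to_mapSum ws _ _ _ (fun w => ?_)
  simp only [excF]
  split_ifs <;> omega

lemma conv_red (ws : List Int) :
    ws.foldl (fun s w => if 0 < w then s + w else s) 0 =
      mapSum redF (ws.map (fun x => x * (-1))) := by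
  refine foldl_to_mapSum ws _ _ _ (fun w => ?_)
  simp only [redF]
  split_ifs <;> omega

lemma conv_cnt (ws : List Int) (L : Int) :
    ws.foldl (fun s w => if L ≤ w then s + 1 else s) 0 =
      mapSum (cntF L) (ws.map (fun x => x * (-1))) := by
  refine foldl_to_mapSum ws _ _ _ (fun w => ?_)
  simp only [cntF]
  split_ifs <;> omega

lemma conv_below (ws : List Int) (L : Int) :
    ws.foldl (fun s w => if w < L then s + w * w else s) 0 =
      mapSum (belF L) (ws.map (fun x => x * (-1))) := by
  refine foldl_to_mapSum ws _ _ _ (fun w => ?_)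
  simp only [belF]
  have : w * (-1) * (w * (-1)) = w * w := by ring
  rw [this]
  split_ifs with h1 h2 <;> first | rfl | omega

lemma mapSum_sq_neg (ws : List Int) :
    mapSum sqF (ws.map (fun x => x * (-1))) = (ws.map (fun w => w * w)).sum := by
  simp only [mapSum, List.map_map]
  exact congrArg List.sum (List.map_congr_left (fun w _ => by
    show (w * (-1)) * (w * (-1)) = w * w
    ring))

lemma solution_eq_FinalSum (n : Int) (works : List Int) :
    solution n works = FinalSum n.toNat (works.map (fun x => x * (-1))) := by
  simp only [solution, FinalSum]
  cases solLoop n.toNat (works.map (fun x => x * (-1))) with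
  | none => rfl
  | some h' =>
    simp only [mapSum]
    exact congrArg List.sum (List.map_congr_left (fun w _ => by
      show w ^ 2 = w * w
      ring))

lemma min_neg_max {ws : List Int} {m mx : Int}
    (hmin : PySem.List.min? (ws.map (fun x => x * (-1))) (fun x => x) = some m)
    (hmax : PySem.List.max? ws (fun x => x) = some mx) : m = -mx := by
  have h2 := PySem.List.min?_isMin hmin
  have h3 := PySem.List.max?_mem hmax
  have h4 := PySem.List.max?_isMax hmax
  have h5 : m ≤ mx * (-1) := h2 _ (List.mem_map_of_mem h3)
  obtain ⟨w0, hw0, hw0e⟩ := List.mem_map.mp (PySem.List.min?_mem hmin)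
  have h6 : w0 ≤ mx := h4 w0 hw0
  omega

-- ===== VERDICT (by name: the statement is the Claim_ definition above) =====
theorem solution_spec : Claim_equal_solution := by
  intro n works _dom hpre
  unfold Spec_solution
  by_cases hn : n ≤ 0 ∨ works = []
  · have hn0 : n ≤ 0 := by
      rcases hn with hn | hn
      · exact hn
      · by_contra hc
        exact (hpre (by omega)) hn
    rw [solution_eq_FinalSum, solution_alt, if_pos hn]
    rw [Int.toNat_of_nonpos hn0]
    show mapSum sqF (works.map (fun x => x * (-1))) = _
    exact mapSum_sq_neg works
  · push Not at hn
    obtain ⟨hn1', hn2⟩ := hn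
    have hn1 : 0 < n := by omega
    have hne : works.map (fun x => x * (-1)) ≠ [] := by
      simpa using hn2
    obtain ⟨m, hmin⟩ := min?_exists_of_ne_nil hne
    cases hmax : PySem.List.max? works (fun x => x) with
    | none => exact absurd ((PySem.List.max?_eq_none_iff works _).mp hmax) hn2
    | some mx =>
    have hm : m = -mx := min_neg_max hmin hmax
    have hk : ((n.toNat : Int)) = n := Int.toNat_of_nonneg (le_of_lt hn1)
    rw [solution_eq_FinalSum, solution_alt, if_neg (by push Not; exact ⟨hn1', hn2⟩)]
    simp only [hmax, Option.getD_some]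
    by_cases hcase : 0 ≤ mx ∧ works.foldl (fun s w => if 0 < w then s + w else s) 0 < n
    · rw [if_pos hcase]
      exact zeroLemma n.toNat _ m hmin (by omega)
        (by rw [← conv_red, hk]; exact hcase.2)
    · rw [if_neg hcase]
      -- binary-search preconditions
      have hlo : n < excessB works (mx - n - 1) := by
        rw [conv_excessB]
        have hmem : mx * (-1) ∈ works.map (fun x => x * (-1)) :=
          List.mem_map_of_mem (PySem.List.max?_mem hmax)
        have h1 : excF (mx - n - 1) (mx * (-1)) = n + 1 := by
          simp only [excF]; omega
        have h2 := single_le_mapSum (excF (mx - n - 1))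
          (fun y _ => by simp [excF]) hmem
        omega
      have hhi : excessB works mx ≤ n := by
        rw [conv_excessB]
        have h0 : mapSum (excF mx) (works.map (fun x => x * (-1))) = 0 :=
          mapSum_exc_eq_zero (fun x hx => by
            obtain ⟨w0, hw0, rfl⟩ := List.mem_map.mp hx
            have := PySem.List.max?_isMax hmax w0 hw0
            omega)
        omega
      obtain ⟨hs1, hs2⟩ := bsLoop_spec works n (mx - (mx - n - 1)).toNat (mx - n - 1) mx
        (by omega) (Int.self_le_toNat _) hlo hhi
      set L := bsLoop works n (mx - (mx - n - 1)).toNat (mx - n - 1) mx with hLdef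
      rw [mainLemma n.toNat _ m L hmin
        (by
          rintro ⟨h1, h2⟩
          rw [← conv_red, hk] at h2
          exact hcase ⟨by omega, h2⟩)
        (by rw [← conv_excessB, hk]; exact hs1)
        (by rw [← conv_excessB, hk]; exact hs2)]
      simp only [formValH, hk]
      rw [← conv_excessB, ← conv_cnt, ← conv_below]
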